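-- pv_equiv track=rewrite | github.com/LiubovShilova/CodeExamples | algo_sequence_analysis/a3e2.py | LF
-- ===== SOURCE A (Python) =====
-- def LF(bwt , C, sigma):  #compute LF, the function is from the lecture
--     char_to_idx = dict ((c, i) for i, c in enumerate (sigma))  #c and i swap
--     counts = list (C)                              # copy list
--     LF = []                                        #initialise empty list
--     for i, c in enumerate (bwt):                   #for each character in bwt
--         char_idx = char_to_idx [c]                 #find the position in F
--         LF.append (counts [char_idx])            #put in list
--         counts[char_idx] += 1                    #add 1 to counts, as we used this character already
--     return LF
-- ===== SOURCE B (Python) =====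
-- def LF(bwt, C, sigma):
--     char_to_idx = {c: i for i, c in enumerate(sigma)}
--     remaining = {}
--     for c in bwt:
--         remaining[c] = remaining.get(c, 0) + 1
--     out = []
--     for c in reversed(bwt):
--         remaining[c] -= 1
--         out.append(C[char_to_idx[c]] + remaining[c])
--     out.reverse()
--     return out
-- ===== Notes on version B (the rewrite author's own statement) =====
-- stated objective: alternative
-- what changed: Instead of mutating a copy of C indexed through sigma while scanning forward, B counts total occurrences per character in one pass, then scans bwt in reverse decrementing a per-character counter and building the output back-to-front, never copying or touching C.
import Mathlib
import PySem

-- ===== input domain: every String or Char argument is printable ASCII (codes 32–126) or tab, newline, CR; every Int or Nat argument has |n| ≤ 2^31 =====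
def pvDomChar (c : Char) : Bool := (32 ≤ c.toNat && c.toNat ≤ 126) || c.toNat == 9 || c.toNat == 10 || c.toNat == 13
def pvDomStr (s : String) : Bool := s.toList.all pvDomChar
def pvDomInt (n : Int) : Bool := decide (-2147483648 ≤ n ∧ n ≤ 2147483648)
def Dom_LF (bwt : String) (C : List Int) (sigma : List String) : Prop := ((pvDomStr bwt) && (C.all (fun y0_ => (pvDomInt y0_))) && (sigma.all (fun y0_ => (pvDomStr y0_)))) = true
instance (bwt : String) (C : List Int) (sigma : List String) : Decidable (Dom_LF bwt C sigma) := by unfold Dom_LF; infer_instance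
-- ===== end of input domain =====

-- B replaces A's forward scan over a mutable copy of C by a counting pass plus a reverse pass
-- building the output back-to-front (alternative decomposition; C is never copied or mutated).

-- ===== PORT A =====
-- shared line of both Pythons: char_to_idx = dict((c, i) for i, c in enumerate(sigma))
def charToIdx (sigma : List String) : PySem.Dict String Int :=
  (PySem.List.enumerate sigma).foldl (fun d p => d.insert p.2 p.1) PySem.Dict.empty

def LF (bwt : String) (C : List Int) (sigma : List String) : List Int :=
  let char_to_idx := charToIdx sigma
  -- counts = list(C); LF = []; for i, c in enumerate(bwt): LF.append(counts[ci]); counts[ci] += 1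
  let st := (PySem.List.enumerate bwt.toList).foldl
    (fun (st : List Int × List Int) p =>
      let char_idx := char_to_idx.getD (String.singleton p.2) 0
      (PySem.List.pySetD st.1 char_idx (PySem.List.pyGetD st.1 char_idx 0 + 1),
       st.2 ++ [PySem.List.pyGetD st.1 char_idx 0]))
    (C, ([] : List Int))
  st.2

-- ===== PORT B =====
def LF_alt (bwt : String) (C : List Int) (sigma : List String) : List Int :=
  let char_to_idx := charToIdx sigma
  -- remaining = {}; for c in bwt: remaining[c] = remaining.get(c, 0) + 1
  let remaining := bwt.toList.foldl (fun d c => d.insert c (d.getD c 0 + 1)) PySem.Dict.empty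
  -- out = []; for c in reversed(bwt): remaining[c] -= 1; out.append(C[char_to_idx[c]] + remaining[c])
  let st := bwt.toList.reverse.foldl
    (fun (st : PySem.Dict Char Int × List Int) c =>
      let d := st.1.insert c (st.1.getD c 0 - 1)
      (d, st.2 ++ [PySem.List.pyGetD C (char_to_idx.getD (String.singleton c) 0) 0 + d.getD c 0]))
    (remaining, ([] : List Int))
  -- out.reverse(); return out
  st.2.reverse

-- ===== PRECONDITION & SPEC =====
-- last index j with sigma[j] = k (the value dict((c,i) for i,c in enumerate(sigma)) stores), if any
def lastIdx : List String → String → Option Nat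
  | [], _ => none
  | s :: rest, k =>
    match lastIdx rest k with
    | some j => some (j + 1)
    | none => if s = k then some 0 else none

-- Pre_ excludes exactly the inputs where A raises (KeyError: a bwt character absent from sigma,
-- or IndexError: its sigma-index out of range of C); B raises on exactly the same inputs.
def Pre_LF (bwt : String) (C : List Int) (sigma : List String) : Prop :=
  (bwt.toList.all (fun c =>
    match lastIdx sigma (String.singleton c) with
    | some j => decide (j < C.length)
    | none => false)) = true
instance (bwt : String) (C : List Int) (sigma : List String) : Decidable (Pre_LF bwt C sigma) := by unfold Pre_LF; infer_instance

def pvWitness_LF : String × List Int × List String := ("abba", [0, 2], ["a", "b"])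

def Spec_LF (bwt : String) (C : List Int) (sigma : List String) (out : List Int) : Prop := out = LF_alt bwt C sigma
instance (bwt : String) (C : List Int) (sigma : List String) (out : List Int) : Decidable (Spec_LF bwt C sigma out) := by unfold Spec_LF; infer_instance

-- ===== CLAIM (what is proved, stated in full; the proofs are below) =====
def Claim_equal_LF : Prop := ∀ (bwt : String) (C : List Int) (sigma : List String), Dom_LF bwt C sigma → Pre_LF bwt C sigma → Spec_LF bwt C sigma (LF bwt C sigma)

-- ===== LEMMAS AND PROOFS =====

-- the sigma-index A and B use for character c
def pvIdx (sigma : List String) (c : Char) : Int :=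
  (charToIdx sigma).getD (String.singleton c) 0

-- the base value C[char_to_idx[c]]
def pvBase (C : List Int) (sigma : List String) (c : Char) : Int :=
  PySem.List.pyGetD C (pvIdx sigma c) 0

-- c admissible: its character occurs in sigma and the stored (last) index is inside C
def Good (C : List Int) (sigma : List String) (c : Char) : Prop :=
  ∃ j : Nat, lastIdx sigma (String.singleton c) = some j ∧ j < C.length

-- the common specification: the LF values of suffix s, prefix p already consumed
def specList (C : List Int) (sigma : List String) : List Char → List Char → List Int
  | _, [] => []
  | p, c :: s => (pvBase C sigma c + (p.count c : Int)) :: specList C sigma (p ++ [c]) s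

theorem lastIdx_getElem {sigma : List String} {k : String} {j : Nat}
    (h : lastIdx sigma k = some j) : sigma[j]? = some k := by
  induction sigma generalizing j with
  | nil => simp [lastIdx] at h
  | cons x rest ih =>
    cases hr : lastIdx rest k with
    | some j' =>
      have hj : j = j' + 1 := by simp [lastIdx, hr] at h; omega
      subst hj
      simpa using ih hr
    | none =>
      by_cases hx : x = k
      · have hj : j = 0 := by simp [lastIdx, hr, hx] at h; omega
        subst hj
        simp [hx]
      · exfalso; simp [lastIdx, hr, hx] at h

theorem charToIdx_fold_get? (sigma : List String) (k : String) :
    ∀ (s : Int) (d : PySem.Dict String Int),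
      ((PySem.List.enumerate sigma s).foldl (fun d p => d.insert p.2 p.1) d).get? k =
        match lastIdx sigma k with
        | some j => some (s + j)
        | none => d.get? k := by
  induction sigma with
  | nil => intro s d; simp [PySem.List.enumerate_nil, lastIdx]
  | cons x rest ih =>
    intro s d
    rw [PySem.List.enumerate_cons, List.foldl_cons, ih (s + 1) (d.insert x s)]
    cases hr : lastIdx rest k with
    | some j =>
      simp only [lastIdx, hr, Option.some.injEq]
      push_cast
      ring
    | none =>
      by_cases hx : x = k
      · subst hx
        simp [lastIdx, hr, PySem.Dict.get?_insert_self]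
      · simp [lastIdx, hr, hx, PySem.Dict.get?_insert_of_ne d s (fun hh => hx hh.symm)]

theorem pvIdx_eq {sigma : List String} {c : Char} {j : Nat}
    (h : lastIdx sigma (String.singleton c) = some j) : pvIdx sigma c = (j : Int) := by
  unfold pvIdx charToIdx
  rw [PySem.Dict.getD_eq_get?_getD, charToIdx_fold_get? sigma (String.singleton c) 0 PySem.Dict.empty, h]
  simp

theorem pvIdx_inj {C : List Int} {sigma : List String} {c1 c2 : Char}
    (h1 : Good C sigma c1) (h2 : Good C sigma c2)
    (h : pvIdx sigma c1 = pvIdx sigma c2) : c1 = c2 := by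
  obtain ⟨j1, hj1, _⟩ := h1
  obtain ⟨j2, hj2, _⟩ := h2
  rw [pvIdx_eq hj1, pvIdx_eq hj2] at h
  have hj : j1 = j2 := by exact_mod_cast h
  subst hj
  have e1 := lastIdx_getElem hj1
  have e2 := lastIdx_getElem hj2
  rw [e1] at e2
  have hs : String.singleton c1 = String.singleton c2 := by injection e2
  have := congrArg String.toList hs
  simpa [String.singleton] using this

theorem good_idx_bounds {C : List Int} {sigma : List String} {c : Char}
    (h : Good C sigma c) : 0 ≤ pvIdx sigma c ∧ pvIdx sigma c < (C.length : Int) := by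
  obtain ⟨j, hj, hlt⟩ := h
  rw [pvIdx_eq hj]
  exact ⟨Int.natCast_nonneg j, by exact_mod_cast hlt⟩

-- value-indexed variant of the spec used for A's loop invariant
def specV (V : Char → Int) : List Char → List Int
  | [] => []
  | c :: s => V c :: specV (fun c' => if c' = c then V c + 1 else V c') s

theorem specV_eq_specList (C : List Int) (sigma : List String) :
    ∀ (s p : List Char), specV (fun c => pvBase C sigma c + (p.count c : Int)) s = specList C sigma p s := by
  intro s
  induction s with
  | nil => intro p; rfl
  | cons c rest ih =>
    intro p
    simp only [specV, specList, List.cons.injEq]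
    refine ⟨by trivial, ?_⟩
    have hfun : (fun c' => (if c' = c then pvBase C sigma c + (p.count c : Int) + 1 else pvBase C sigma c' + (p.count c' : Int)))
        = fun c' => pvBase C sigma c' + (((p ++ [c]).count c' : Nat) : Int) := by
      funext c'
      by_cases hc : c' = c
      · subst hc
        simp [List.count_append]
        ring
      · simp [List.count_append, hc, Ne.symm hc]
    rw [← ih (p ++ [c]), hfun]

-- A's loop: with counts holding V's value at each remaining character's index, it emits specV V s
theorem A_loop (C : List Int) (sigma : List String) :
    ∀ (s : List Char) (i : Int) (counts acc : List Int) (V : Char → Int),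
      counts.length = C.length →
      (∀ c ∈ s, Good C sigma c) →
      (∀ c ∈ s, PySem.List.pyGetD counts (pvIdx sigma c) 0 = V c) →
      ((PySem.List.enumerate s i).foldl
        (fun (st : List Int × List Int) p =>
          (PySem.List.pySetD st.1 ((charToIdx sigma).getD (String.singleton p.2) 0)
             (PySem.List.pyGetD st.1 ((charToIdx sigma).getD (String.singleton p.2) 0) 0 + 1),
           st.2 ++ [PySem.List.pyGetD st.1 ((charToIdx sigma).getD (String.singleton p.2) 0) 0]))
        (counts, acc)).2 = acc ++ specV V s := by
  intro s
  induction s with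
  | nil => intro i counts acc V _ _ _; simp [PySem.List.enumerate_nil, specV]
  | cons c rest ih =>
    intro i counts acc V hlen hgood hinv
    simp only [PySem.List.enumerate_cons, List.foldl_cons]
    have hgc : Good C sigma c := hgood c (by simp)
    have hb := good_idx_bounds (C := C) hgc
    have hcur : PySem.List.pyGetD counts (pvIdx sigma c) 0 = V c := hinv c (by simp)
    have hidx : (charToIdx sigma).getD (String.singleton c) 0 = pvIdx sigma c := rfl
    rw [hidx, PySem.List.pySetD_of_nonneg counts _ hb.1, hcur]
    rw [ih (i + 1) (counts.set (pvIdx sigma c).toNat (V c + 1)) (acc ++ [V c])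
        (fun c' => if c' = c then V c + 1 else V c') ?hlen ?hgood ?hinv]
    · show acc ++ [V c] ++ specV _ rest = acc ++ (V c :: specV _ rest)
      simp
    case hlen => simp [hlen]
    case hgood => exact fun c' hc' => hgood c' (List.mem_cons_of_mem _ hc')
    case hinv =>
      intro c' hc'
      have hgc' : Good C sigma c' := hgood c' (List.mem_cons_of_mem _ hc')
      have hb' := good_idx_bounds (C := C) hgc'
      show PySem.List.pyGetD _ _ _ = if c' = c then V c + 1 else V c'
      rw [PySem.List.pyGetD_eq_getElem _ 0 hb'.1 (by simp [hlen]; exact hb'.2), List.getElem_set]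
      by_cases hcc : c' = c
      · subst hcc; simp
      · have hne : (pvIdx sigma c).toNat ≠ (pvIdx sigma c').toNat := by
          intro hnn
          exact hcc (pvIdx_inj (C := C) hgc' hgc (by omega))
        rw [if_neg hne, if_neg hcc,
            ← PySem.List.pyGetD_eq_getElem counts 0 hb'.1 (by rw [hlen]; exact hb'.2)]
        exact hinv c' (List.mem_cons_of_mem _ hc')

-- specList over a snoc suffix
theorem specList_snoc (C : List Int) (sigma : List String) :
    ∀ (s p : List Char) (c : Char),
      specList C sigma p (s ++ [c]) = specList C sigma p s ++ [pvBase C sigma c + (((p ++ s).count c : Nat) : Int)] := by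
  intro s
  induction s with
  | nil => intro p c; simp [specList]
  | cons x rest ih =>
    intro p c
    show (pvBase C sigma x + (p.count x : Int)) :: specList C sigma (p ++ [x]) (rest ++ [c]) = _
    rw [ih]
    simp [specList, List.append_assoc]

-- B's reverse loop over the first m characters of l
theorem B_loop (C : List Int) (sigma : List String) (l : List Char) :
    ∀ (m : Nat), m ≤ l.length →
      ∀ (d : PySem.Dict Char Int) (acc : List Int),
      (∀ c : Char, d.getD c 0 = ((l.take m).count c : Int)) →
      (((l.take m).reverse).foldl
        (fun (st : PySem.Dict Char Int × List Int) c =>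
          (st.1.insert c (st.1.getD c 0 - 1),
           st.2 ++ [PySem.List.pyGetD C ((charToIdx sigma).getD (String.singleton c) 0) 0 +
                     (st.1.insert c (st.1.getD c 0 - 1)).getD c 0]))
        (d, acc)).2 = acc ++ (specList C sigma [] (l.take m)).reverse := by
  intro m
  induction m with
  | zero => intro _ d acc _; simp [specList]
  | succ m ih =>
    intro hm d acc hd
    have hlt : m < l.length := by omega
    have htake : l.take (m + 1) = l.take m ++ [l[m]] := by
      rw [List.take_add_one]
      simp [List.getElem?_eq_getElem hlt]
    rw [htake] at hd
    have hdc : d.getD l[m] 0 = ((l.take m).count l[m] : Int) + 1 := by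
      have := hd l[m]
      rw [List.count_append] at this
      simpa using this
    have hd' : ∀ c : Char, (d.insert l[m] (d.getD l[m] 0 - 1)).getD c 0 = ((l.take m).count c : Int) := by
      intro c
      by_cases hc : c = l[m]
      · subst hc
        rw [PySem.Dict.getD_insert_self, hdc]
        ring
      · rw [PySem.Dict.getD_insert_of_ne _ _ _ hc, hd c, List.count_append]
        have h0 : List.count c [l[m]] = 0 := by
          simp [List.count_cons]
          exact Ne.symm hc
        rw [h0]
        simp
    rw [htake, List.reverse_append]
    simp only [List.reverse_singleton, List.singleton_append, List.foldl_cons]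
    rw [ih (by omega) (d.insert l[m] (d.getD l[m] 0 - 1))
        (acc ++ [PySem.List.pyGetD C ((charToIdx sigma).getD (String.singleton l[m]) 0) 0 +
                  (d.insert l[m] (d.getD l[m] 0 - 1)).getD l[m] 0]) hd']
    rw [specList_snoc, hd' l[m]]
    simp [List.reverse_append, List.append_assoc, pvBase, pvIdx]

-- Pre_ gives Good for every character of bwt
theorem pre_good {bwt : String} {C : List Int} {sigma : List String}
    (h : Pre_LF bwt C sigma) : ∀ c ∈ bwt.toList, Good C sigma c := by
  intro c hc
  unfold Pre_LF at h
  rw [List.all_eq_true] at h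
  have hcp := h c hc
  cases hl : lastIdx sigma (String.singleton c) with
  | none => rw [hl] at hcp; simp at hcp
  | some j =>
    rw [hl] at hcp
    simp at hcp
    exact ⟨j, hl, hcp⟩

-- ===== VERDICT (by name: the statement is the Claim_ definition above) =====
theorem LF_spec : Claim_equal_LF := by
  intro bwt C sigma _ hpre
  unfold Spec_LF
  have hgood := pre_good hpre
  have hA : LF bwt C sigma
      = [] ++ specV (fun c => pvBase C sigma c + ((([] : List Char).count c : Nat) : Int)) bwt.toList :=
    A_loop C sigma bwt.toList 0 C [] _ rfl hgood (fun c _ => by simp [pvBase])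
  rw [hA, specV_eq_specList C sigma bwt.toList [], List.nil_append]
  have hcnt : ∀ c : Char,
      (bwt.toList.foldl (fun d c => d.insert c (d.getD c 0 + 1)) PySem.Dict.empty).getD c 0
        = (((bwt.toList.take bwt.toList.length).count c : Nat) : Int) := by
    intro c
    rw [PySem.Dict.getD_foldl_insert_add_one, PySem.Dict.getD_empty, List.take_length]
    simp
  have hB0 := B_loop C sigma bwt.toList bwt.toList.length le_rfl
    (bwt.toList.foldl (fun d c => d.insert c (d.getD c 0 + 1)) PySem.Dict.empty) [] hcnt
  rw [List.take_length] at hB0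
  have hB : LF_alt bwt C sigma = (([] : List Int) ++ (specList C sigma [] bwt.toList).reverse).reverse :=
    congrArg List.reverse hB0
  rw [hB]
  simp
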